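-- pv_equiv track=rewrite | github.com/mso9999/ScrollCipher-Challenge | scrollcipher_engine.py | direction_for_index_mode
-- ===== SOURCE A (Python) =====
-- def direction_for_index_mode(i: int, mode: int) -> str:
--     if mode == 0:
--         return "CW"
--     if mode == 1:
--         return "CCW"
--     if mode == 2:
--         return "CW" if (i % 2) == 0 else "CCW"
--     if mode == 3:
--         return "CCW" if (i % 2) == 0 else "CW"
--     n = mode
--     current = "CW" if (n % 2) == 0 else "CCW"
--     if i == 0:
--         return current
--     for idx in range(1, i + 1):
--         if ((idx + 1) % n) == 0:
--             continue
--         current = "CCW" if current == "CW" else "CW"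
--     return current
-- ===== SOURCE B (Python) =====
-- def direction_for_index_mode(i: int, mode: int) -> str:
--     if mode == 0:
--         return "CW"
--     if mode == 1:
--         return "CCW"
--     if mode == 2:
--         return "CW" if (i % 2) == 0 else "CCW"
--     if mode == 3:
--         return "CCW" if (i % 2) == 0 else "CW"
--     # General mode: start at parity of mode, then one flip per idx in 1..i
--     # except when idx+1 is a multiple of mode. Count the flips arithmetically.
--     n = abs(mode)
--     base = mode % 2  # 0 -> CW start, 1 -> CCW start
--     flips = 0 if i <= 0 else i - ((i + 1) // n - 1 // n)
--     return "CCW" if (base + flips) % 2 == 1 else "CW"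
-- ===== Notes on version B (the rewrite author's own statement) =====
-- stated objective: faster
-- what changed: Replaces the O(i) flip-by-flip loop with an O(1) closed-form flip count (i minus the number of multiples of |mode| in [2, i+1], computed by floor division) and decides CW/CCW by its parity.
import Mathlib
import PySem

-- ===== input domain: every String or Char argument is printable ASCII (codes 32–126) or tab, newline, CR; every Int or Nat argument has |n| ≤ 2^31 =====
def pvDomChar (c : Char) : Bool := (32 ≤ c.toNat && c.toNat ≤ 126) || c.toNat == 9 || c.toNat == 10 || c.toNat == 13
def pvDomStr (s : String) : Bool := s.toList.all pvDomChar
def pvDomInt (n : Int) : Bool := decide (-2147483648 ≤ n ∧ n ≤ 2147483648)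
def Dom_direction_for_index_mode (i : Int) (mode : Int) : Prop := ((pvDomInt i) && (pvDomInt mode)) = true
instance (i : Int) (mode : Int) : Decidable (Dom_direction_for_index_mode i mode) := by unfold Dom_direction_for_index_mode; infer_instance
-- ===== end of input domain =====

-- B replaces A's O(i) flip-by-flip loop with an O(1) closed-form flip count (i minus the
-- number of multiples of |mode| in [2, i+1]) and decides the direction by its parity.

-- ===== PORT A =====
-- A's loop body: keep current when (idx+1) % n == 0, otherwise toggle it.
def pvFlipStep (n : Int) (cur : String) (idx : Int) : String :=
  if PySem.Int.mod (idx + 1) n = 0 then cur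
  else if cur = "CW" then "CCW" else "CW"

def direction_for_index_mode (i : Int) (mode : Int) : String :=
  if mode = 0 then "CW"
  else if mode = 1 then "CCW"
  else if mode = 2 then (if PySem.Int.mod i 2 = 0 then "CW" else "CCW")
  else if mode = 3 then (if PySem.Int.mod i 2 = 0 then "CCW" else "CW")
  else
    let n := mode
    let current := if PySem.Int.mod n 2 = 0 then "CW" else "CCW"
    if i = 0 then current
    else (PySem.List.pyRange 1 (i + 1) 1).foldl (pvFlipStep n) current

-- ===== PORT B =====
def direction_for_index_mode_alt (i : Int) (mode : Int) : String :=
  if mode = 0 then "CW"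
  else if mode = 1 then "CCW"
  else if mode = 2 then (if PySem.Int.mod i 2 = 0 then "CW" else "CCW")
  else if mode = 3 then (if PySem.Int.mod i 2 = 0 then "CCW" else "CW")
  else
    let n := |mode|
    let base := PySem.Int.mod mode 2
    let flips := if i ≤ 0 then 0
      else i - (PySem.Int.floordiv (i + 1) n - PySem.Int.floordiv 1 n)
    if PySem.Int.mod (base + flips) 2 = 1 then "CCW" else "CW"

-- ===== PRECONDITION & SPEC =====
def Spec_direction_for_index_mode (i : Int) (mode : Int) (out : String) : Prop := out = direction_for_index_mode_alt i mode
instance (i : Int) (mode : Int) (out : String) : Decidable (Spec_direction_for_index_mode i mode out) := by unfold Spec_direction_for_index_mode; infer_instance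

-- ===== CLAIM (what is proved, stated in full; the proofs are below) =====
def Claim_equal_direction_for_index_mode : Prop := ∀ (i : Int) (mode : Int), Dom_direction_for_index_mode i mode → Spec_direction_for_index_mode i mode (direction_for_index_mode i mode)

-- ===== LEMMAS AND PROOFS =====

-- (m+1)/n grows by 1 over m/n exactly when n divides m+1 (floor division, 0 < n)
lemma ediv_succ (m n : Int) (hn : 0 < n) :
    (m + 1) / n = m / n + (if n ∣ (m + 1) then 1 else 0) := by
  have h0 := Int.mul_ediv_add_emod m n
  have h0' := Int.mul_ediv_add_emod (m + 1) n
  have h1 : 0 ≤ m % n := Int.emod_nonneg m (by omega)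
  have h2 : m % n < n := Int.emod_lt_of_pos m hn
  have h1' : 0 ≤ (m + 1) % n := Int.emod_nonneg (m + 1) (by omega)
  have h2' : (m + 1) % n < n := Int.emod_lt_of_pos (m + 1) hn
  have hdvd : n ∣ (m + 1) ↔ (m + 1) % n = 0 := Int.dvd_iff_emod_eq_zero ..
  set q := m / n with hq
  set q' := (m + 1) / n with hq'
  have key : n * (q' - q) = m % n + 1 - (m + 1) % n := by linear_combination h0' - h0
  have hd : q' - q = 0 ∨ q' - q = 1 := by
    rcases lt_trichotomy (q' - q) 0 with h | h | h
    · exfalso; nlinarith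
    · left; exact h
    · rcases (by omega : q' - q = 1 ∨ 2 ≤ q' - q) with h' | h'
      · right; exact h'
      · exfalso; nlinarith
  rcases hd with h | h <;> rw [h] at key <;> simp only [mul_zero, mul_one] at key <;>
    simp only [hdvd] <;> split_ifs with hz <;> omega

-- closed-form flip count after processing idx = 1 .. j (n = |mode| > 0, floor division)
def pvFlips (j : Nat) (n : Int) : Int := (j : Int) - (((j : Int) + 1) / n - 1 / n)

-- A's loop equals a parity decision on the closed-form flip count
lemma loop_parity (mode : Int) (hm : mode ≠ 0) (j : Nat) (cur : String)
    (hc : cur = "CW" ∨ cur = "CCW") :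
    (PySem.List.pyRange 1 ((j : Int) + 1) 1).foldl (pvFlipStep mode) cur
      = (if pvFlips j |mode| % 2 = 0 then cur else if cur = "CW" then "CCW" else "CW") := by
  have hn : 0 < |mode| := abs_pos.mpr hm
  induction j with
  | zero =>
    rw [show ((0 : Nat) : Int) + 1 = 0 + 1 by norm_num,
      PySem.List.pyRange_one_eq_nil (by norm_num)]
    simp [pvFlips]
  | succ j ih =>
    have hb : (1 : Int) ≤ (j : Int) + 1 := by omega
    have hcast : (((j + 1 : Nat) : Int)) + 1 = ((j : Int) + 1) + 1 := by push_cast; ring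
    rw [hcast, PySem.List.pyRange_one_succ_right hb, List.foldl_append, ih]
    have hcount := ediv_succ ((j : Int) + 1) |mode| hn
    have hmodiff : PySem.Int.mod ((j : Int) + 1 + 1) mode = 0 ↔ |mode| ∣ ((j : Int) + 1 + 1) := by
      rw [PySem.Int.mod_eq_zero_iff_dvd, abs_dvd]
    have hflips : pvFlips (j + 1) |mode|
        = pvFlips j |mode| + (if |mode| ∣ ((j : Int) + 1 + 1) then 0 else 1) := by
      simp only [pvFlips]
      push_cast
      rw [show (j : Int) + 1 + 1 = ((j : Int) + 1) + 1 by ring, hcount]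
      split_ifs <;> ring
    simp only [List.foldl_cons, List.foldl_nil, pvFlipStep]
    by_cases hd : |mode| ∣ ((j : Int) + 1 + 1)
    · rw [if_pos (hmodiff.mpr hd)] at *
      rw [if_pos hd] at hflips
      rcases hc with hcur | hcur <;> subst hcur <;>
        by_cases hp : pvFlips j |mode| % 2 = 0 <;>
        · simp only [hflips]
          split_ifs <;> simp_all
    · have hne : ¬ PySem.Int.mod ((j : Int) + 1 + 1) mode = 0 := fun h => hd (hmodiff.mp h)
      rw [if_neg hd] at hflips
      have hp2 : pvFlips (j + 1) |mode| % 2 = 0 ↔ ¬ pvFlips j |mode| % 2 = 0 := by omega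
      rcases hc with hcur | hcur <;> subst hcur <;>
        by_cases hp : pvFlips j |mode| % 2 = 0 <;>
        · simp only [hflips]
          split_ifs <;> simp_all

-- ===== VERDICT (by name: the statement is the Claim_ definition above) =====
theorem direction_for_index_mode_spec : Claim_equal_direction_for_index_mode := by
  intro i mode _
  unfold Spec_direction_for_index_mode direction_for_index_mode direction_for_index_mode_alt
  by_cases h0 : mode = 0; · simp [h0]
  by_cases h1 : mode = 1; · simp [h1]
  by_cases h2 : mode = 2; · simp [h2]
  by_cases h3 : mode = 3; · simp [h3]
  simp only [if_neg h0, if_neg h1, if_neg h2, if_neg h3]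
  have hn : 0 < |mode| := abs_pos.mpr h0
  have hbase : PySem.Int.mod mode 2 = mode % 2 := PySem.Int.mod_eq_emod_of_pos (by norm_num)
  have hb01 : mode % 2 = 0 ∨ mode % 2 = 1 := by omega
  by_cases hip : 0 < i
  · -- i ≥ 1 : the loop runs; replace it by the parity of the closed-form count
    have hi0 : i ≠ 0 := by omega
    have hile : ¬ i ≤ 0 := by omega
    have hj : i = ((i.toNat : Nat) : Int) := by omega
    rw [if_neg hi0, if_neg hile]
    rw [hj, loop_parity mode h0 i.toNat _ (by split_ifs <;> simp)]
    have hfd : PySem.Int.floordiv (((i.toNat : Nat) : Int) + 1) |mode|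
        = (((i.toNat : Nat) : Int) + 1) / |mode| := PySem.Int.floordiv_eq_ediv_of_pos hn
    have hfd1 : PySem.Int.floordiv 1 |mode| = 1 / |mode| := PySem.Int.floordiv_eq_ediv_of_pos hn
    rw [hfd, hfd1]
    have hflips : ((i.toNat : Nat) : Int) - ((((i.toNat : Nat) : Int) + 1) / |mode| - 1 / |mode|)
        = pvFlips i.toNat |mode| := rfl
    rw [hflips]
    have hmod2 : PySem.Int.mod (mode % 2 + pvFlips i.toNat |mode|) 2
        = (mode % 2 + pvFlips i.toNat |mode|) % 2 := PySem.Int.mod_eq_emod_of_pos (by norm_num)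
    rw [hbase, hmod2]
    generalize pvFlips i.toNat |mode| = F
    have hF : F % 2 = 0 ∨ F % 2 = 1 := by omega
    have hsum0 : ((0 : Int) + F) % 2 = F % 2 := by omega
    have hsum1 : ((1 : Int) + F) % 2 = 1 - F % 2 := by omega
    rcases hb01 with hb | hb <;> rw [hb] <;>
      rcases hF with hF | hF <;>
      simp [hsum0, hsum1, hF]
  · -- i ≤ 0 : the loop body never runs; both sides give the starting direction
    have hile : i ≤ 0 := by omega
    have hL : (if i = 0 then (if PySem.Int.mod mode 2 = 0 then "CW" else "CCW")
        else (PySem.List.pyRange 1 (i + 1) 1).foldl (pvFlipStep mode)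
          (if PySem.Int.mod mode 2 = 0 then "CW" else "CCW"))
        = (if PySem.Int.mod mode 2 = 0 then "CW" else "CCW") := by
      by_cases hi0 : i = 0
      · rw [if_pos hi0]
      · rw [if_neg hi0, PySem.List.pyRange_one_eq_nil (by omega), List.foldl_nil]
    rw [hL, if_pos hile]
    have hmod2 : PySem.Int.mod (mode % 2 + 0) 2 = (mode % 2 + 0) % 2 :=
      PySem.Int.mod_eq_emod_of_pos (by norm_num)
    rw [hbase, hmod2]
    rcases hb01 with hb | hb <;> rw [hb] <;> norm_num
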